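-- pv_equiv track=rewrite | github.com/SarangKulkarniamb/orato | orato-be/http_routes.py | _normalize_search_query
-- ===== SOURCE A (Python) =====
-- def _normalize_search_query(query: str) -> str:
--     query = " ".join((query or "").strip().split())
--     lowered = query.lower()
--     for prefix in [
--         "go and search for",
--         "go and search",
--         "go search for",
--         "go search",
--         "search for",
--         "search",
--         "google this",
--         "search this online",
--         "search this on google",
--         "search this",
--         "look this up",
--         "google",
--         "search google for",
--         "search google",
--         "search the web for",
--         "search the web",
--         "search web for",
--         "search web",
--         "search online for",
--         "search online",
--         "look up",
--         "web search",
--     ]: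
--         if lowered.startswith(prefix):
--             trimmed = query[len(prefix):].strip(" :,-")
--             return trimmed
--     return query
-- ===== SOURCE B (Python) =====
-- def _matched_prefix_len(lowered):
--     # Decision tree over mutually exclusive prefix families; returns the length
--     # of the command prefix to strip, or None if the query has no such prefix.
--     if lowered.startswith("go and search"):
--         return 17 if lowered.startswith("go and search for") else 13
--     if lowered.startswith("go search"):
--         return 13 if lowered.startswith("go search for") else 9
--     if lowered.startswith("search"):
--         return 10 if lowered.startswith("search for") else 6
--     if lowered.startswith("google"):
--         return 11 if lowered.startswith("google this") else 6
--     if lowered.startswith("look this up"):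
--         return 12
--     if lowered.startswith("look up"):
--         return 7
--     if lowered.startswith("web search"):
--         return 10
--     return None
--
--
-- def _apply_cut(query, n):
--     return query if n is None else query[n:].strip(" :,-")
--
--
-- def _normalize_search_query(query: str) -> str:
--     query = " ".join(query.strip().split())
--     return _apply_cut(query, _matched_prefix_len(query.lower()))
-- ===== Notes on version B (the rewrite author's own statement) =====
-- stated objective: alternative
-- what changed: Replaces the ordered scan over 22 startswith-tested prefix strings by a nested decision tree over 7 mutually exclusive prefix families (shadowed list entries eliminated) that returns the match length, then slices once.
import Mathlib
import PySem

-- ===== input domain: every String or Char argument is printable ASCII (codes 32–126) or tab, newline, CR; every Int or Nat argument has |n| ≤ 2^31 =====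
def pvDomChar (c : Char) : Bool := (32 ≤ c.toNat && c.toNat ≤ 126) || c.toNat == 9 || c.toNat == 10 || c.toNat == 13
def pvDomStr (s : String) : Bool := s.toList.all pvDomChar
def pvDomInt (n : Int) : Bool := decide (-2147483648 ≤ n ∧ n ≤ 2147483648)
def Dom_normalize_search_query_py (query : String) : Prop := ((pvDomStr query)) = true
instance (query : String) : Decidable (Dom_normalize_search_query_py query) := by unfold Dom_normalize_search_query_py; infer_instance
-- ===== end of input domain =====

-- B replaces A's ordered scan over 22 prefix strings by a nested decision tree over
-- 7 mutually exclusive prefix families that returns the match length (objective: alternative).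

-- ===== PORT A =====
-- the literal prefix list of A, in A's order
def pvPrefixesA : List String :=
  ["go and search for", "go and search", "go search for", "go search",
   "search for", "search", "google this", "search this online",
   "search this on google", "search this", "look this up", "google",
   "search google for", "search google", "search the web for", "search the web",
   "search web for", "search web", "search online for", "search online",
   "look up", "web search"]

-- A's for-loop with early return: first prefix that matches wins
def pvLoopA (prefixes : List String) (lowered query : String) : String :=
  match prefixes with
  | [] => query
  | p :: ps =>
    if PySem.Str.startswith lowered p then
      PySem.Str.stripChars (PySem.Str.slice query (some (PySem.Str.len p)) none) " :,-"
    else pvLoopA ps lowered query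

def normalize_search_query_py (query : String) : String :=
  let query := PySem.Str.join " " (PySem.Str.split₀ (PySem.Str.strip (if query = "" then "" else query)))
  let lowered := PySem.Str.lower query
  pvLoopA pvPrefixesA lowered query

-- ===== PORT B =====
-- B's decision tree: length of the command prefix to strip, or none
def pvMatchedPrefixLen (lowered : String) : Option Int :=
  if PySem.Str.startswith lowered "go and search" then
    some (if PySem.Str.startswith lowered "go and search for" then 17 else 13)
  else if PySem.Str.startswith lowered "go search" then
    some (if PySem.Str.startswith lowered "go search for" then 13 else 9)
  else if PySem.Str.startswith lowered "search" then
    some (if PySem.Str.startswith lowered "search for" then 10 else 6)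
  else if PySem.Str.startswith lowered "google" then
    some (if PySem.Str.startswith lowered "google this" then 11 else 6)
  else if PySem.Str.startswith lowered "look this up" then some 12
  else if PySem.Str.startswith lowered "look up" then some 7
  else if PySem.Str.startswith lowered "web search" then some 10
  else none

def pvApplyCut (query : String) (n : Option Int) : String :=
  match n with
  | none => query
  | some n => PySem.Str.stripChars (PySem.Str.slice query (some n) none) " :,-"

def normalize_search_query_py_alt (query : String) : String :=
  let q := PySem.Str.join " " (PySem.Str.split₀ (PySem.Str.strip query))
  pvApplyCut q (pvMatchedPrefixLen (PySem.Str.lower q))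

-- ===== PRECONDITION & SPEC =====
def Spec_normalize_search_query_py (query : String) (out : String) : Prop := out = normalize_search_query_py_alt query
instance (query : String) (out : String) : Decidable (Spec_normalize_search_query_py query out) := by unfold Spec_normalize_search_query_py; infer_instance

-- ===== CLAIM (what is proved, stated in full; the proofs are below) =====
def Claim_equal_normalize_search_query_py : Prop := ∀ (query : String), Dom_normalize_search_query_py query → Spec_normalize_search_query_py query (normalize_search_query_py query)

-- ===== LEMMAS AND PROOFS =====

lemma pv_sw_iff (l p : String) : PySem.Str.startswith l p = true ↔ p.toList <+: l.toList := by
  rw [PySem.Str.startswith_eq]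
  exact List.isPrefixOf_iff_prefix

-- if p is a prefix of q and l starts with q, then l starts with p
lemma pv_mono {l p q : String} (h : p.toList.isPrefixOf q.toList = true)
    (hq : PySem.Str.startswith l q = true) : PySem.Str.startswith l p = true := by
  rw [pv_sw_iff] at hq ⊢
  rw [List.isPrefixOf_iff_prefix] at h
  exact h.trans hq

-- contrapositive of pv_mono
lemma pv_mono_neg {l p q : String} (h : p.toList.isPrefixOf q.toList = true)
    (hp : PySem.Str.startswith l p = false) : PySem.Str.startswith l q = false := by
  cases hb : PySem.Str.startswith l q with
  | false => rfl
  | true => exact absurd (pv_mono h hb) (by rw [hp]; exact Bool.false_ne_true)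

-- two incomparable strings cannot both be prefixes of l
lemma pv_excl {l p q : String} (h1 : p.toList.isPrefixOf q.toList = false)
    (h2 : q.toList.isPrefixOf p.toList = false)
    (hp : PySem.Str.startswith l p = true) : PySem.Str.startswith l q = false := by
  cases hb : PySem.Str.startswith l q with
  | false => rfl
  | true =>
    rw [pv_sw_iff] at hp hb
    rcases List.prefix_or_prefix_of_prefix hp hb with hc | hc
    · exact absurd ((List.isPrefixOf_iff_prefix).mpr hc) (by rw [h1]; exact Bool.false_ne_true)
    · exact absurd ((List.isPrefixOf_iff_prefix).mpr hc) (by rw [h2]; exact Bool.false_ne_true)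

-- core selector equivalence: A's ordered scan equals B's decision tree
lemma pv_sel (l q : String) :
    pvLoopA pvPrefixesA l q = pvApplyCut q (pvMatchedPrefixLen l) := by
  unfold pvMatchedPrefixLen
  simp only [pvPrefixesA]
  have hstep : ∀ (p : String) (ps : List String),
      pvLoopA (p :: ps) l q = if PySem.Str.startswith l p then
        PySem.Str.stripChars (PySem.Str.slice q (some (PySem.Str.len p)) none) " :,-"
      else pvLoopA ps l q := fun p ps => rfl
  have hnil : pvLoopA ([] : List String) l q = q := rfl
  by_cases h1 : PySem.Str.startswith l "go and search" = true
  · by_cases h1a : PySem.Str.startswith l "go and search for" = true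
    · rw [h1, h1a]
      rw [hstep, h1a, if_pos rfl]
      rfl
    · simp only [Bool.not_eq_true] at h1a
      rw [h1, h1a]
      rw [hstep, h1a, if_neg Bool.false_ne_true]
      rw [hstep, h1, if_pos rfl]
      rfl
  · simp only [Bool.not_eq_true] at h1
    have f1 : PySem.Str.startswith l "go and search for" = false := pv_mono_neg (by decide) h1
    by_cases h2 : PySem.Str.startswith l "go search" = true
    · by_cases h2a : PySem.Str.startswith l "go search for" = true
      · rw [h1, h2, h2a]
        rw [hstep, f1, if_neg Bool.false_ne_true]
        rw [hstep, h1, if_neg Bool.false_ne_true]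
        rw [hstep, h2a, if_pos rfl]
        rfl
      · simp only [Bool.not_eq_true] at h2a
        rw [h1, h2, h2a]
        rw [hstep, f1, if_neg Bool.false_ne_true]
        rw [hstep, h1, if_neg Bool.false_ne_true]
        rw [hstep, h2a, if_neg Bool.false_ne_true]
        rw [hstep, h2, if_pos rfl]
        rfl
    · simp only [Bool.not_eq_true] at h2
      have f2 : PySem.Str.startswith l "go search for" = false := pv_mono_neg (by decide) h2
      by_cases h3 : PySem.Str.startswith l "search" = true
      · by_cases h3a : PySem.Str.startswith l "search for" = true
        · rw [h1, h2, h3, h3a]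
          rw [hstep, f1, if_neg Bool.false_ne_true]
          rw [hstep, h1, if_neg Bool.false_ne_true]
          rw [hstep, f2, if_neg Bool.false_ne_true]
          rw [hstep, h2, if_neg Bool.false_ne_true]
          rw [hstep, h3a, if_pos rfl]
          rfl
        · simp only [Bool.not_eq_true] at h3a
          rw [h1, h2, h3, h3a]
          rw [hstep, f1, if_neg Bool.false_ne_true]
          rw [hstep, h1, if_neg Bool.false_ne_true]
          rw [hstep, f2, if_neg Bool.false_ne_true]
          rw [hstep, h2, if_neg Bool.false_ne_true]
          rw [hstep, h3a, if_neg Bool.false_ne_true]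
          rw [hstep, h3, if_pos rfl]
          rfl
      · simp only [Bool.not_eq_true] at h3
        have s1 : PySem.Str.startswith l "search for" = false := pv_mono_neg (by decide) h3
        have s2 : PySem.Str.startswith l "search this online" = false := pv_mono_neg (by decide) h3
        have s3 : PySem.Str.startswith l "search this on google" = false := pv_mono_neg (by decide) h3
        have s4 : PySem.Str.startswith l "search this" = false := pv_mono_neg (by decide) h3
        have s5 : PySem.Str.startswith l "search google for" = false := pv_mono_neg (by decide) h3
        have s6 : PySem.Str.startswith l "search google" = false := pv_mono_neg (by decide) h3
        have s7 : PySem.Str.startswith l "search the web for" = false := pv_mono_neg (by decide) h3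
        have s8 : PySem.Str.startswith l "search the web" = false := pv_mono_neg (by decide) h3
        have s9 : PySem.Str.startswith l "search web for" = false := pv_mono_neg (by decide) h3
        have s10 : PySem.Str.startswith l "search web" = false := pv_mono_neg (by decide) h3
        have s11 : PySem.Str.startswith l "search online for" = false := pv_mono_neg (by decide) h3
        have s12 : PySem.Str.startswith l "search online" = false := pv_mono_neg (by decide) h3
        by_cases h4 : PySem.Str.startswith l "google" = true
        · by_cases h4a : PySem.Str.startswith l "google this" = true
          · rw [h1, h2, h3, h4, h4a]
            rw [hstep, f1, if_neg Bool.false_ne_true]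
            rw [hstep, h1, if_neg Bool.false_ne_true]
            rw [hstep, f2, if_neg Bool.false_ne_true]
            rw [hstep, h2, if_neg Bool.false_ne_true]
            rw [hstep, s1, if_neg Bool.false_ne_true]
            rw [hstep, h3, if_neg Bool.false_ne_true]
            rw [hstep, h4a, if_pos rfl]
            rfl
          · simp only [Bool.not_eq_true] at h4a
            have flu : PySem.Str.startswith l "look this up" = false := pv_excl (by decide) (by decide) h4
            rw [h1, h2, h3, h4, h4a]
            rw [hstep, f1, if_neg Bool.false_ne_true]
            rw [hstep, h1, if_neg Bool.false_ne_true]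
            rw [hstep, f2, if_neg Bool.false_ne_true]
            rw [hstep, h2, if_neg Bool.false_ne_true]
            rw [hstep, s1, if_neg Bool.false_ne_true]
            rw [hstep, h3, if_neg Bool.false_ne_true]
            rw [hstep, h4a, if_neg Bool.false_ne_true]
            rw [hstep, s2, if_neg Bool.false_ne_true]
            rw [hstep, s3, if_neg Bool.false_ne_true]
            rw [hstep, s4, if_neg Bool.false_ne_true]
            rw [hstep, flu, if_neg Bool.false_ne_true]
            rw [hstep, h4, if_pos rfl]
            rfl
        · simp only [Bool.not_eq_true] at h4
          have g1 : PySem.Str.startswith l "google this" = false := pv_mono_neg (by decide) h4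
          by_cases h5 : PySem.Str.startswith l "look this up" = true
          · rw [h1, h2, h3, h4, h5]
            rw [hstep, f1, if_neg Bool.false_ne_true]
            rw [hstep, h1, if_neg Bool.false_ne_true]
            rw [hstep, f2, if_neg Bool.false_ne_true]
            rw [hstep, h2, if_neg Bool.false_ne_true]
            rw [hstep, s1, if_neg Bool.false_ne_true]
            rw [hstep, h3, if_neg Bool.false_ne_true]
            rw [hstep, g1, if_neg Bool.false_ne_true]
            rw [hstep, s2, if_neg Bool.false_ne_true]
            rw [hstep, s3, if_neg Bool.false_ne_true]
            rw [hstep, s4, if_neg Bool.false_ne_true]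
            rw [hstep, h5, if_pos rfl]
            rfl
          · simp only [Bool.not_eq_true] at h5
            by_cases h6 : PySem.Str.startswith l "look up" = true
            · rw [h1, h2, h3, h4, h5, h6]
              rw [hstep, f1, if_neg Bool.false_ne_true]
              rw [hstep, h1, if_neg Bool.false_ne_true]
              rw [hstep, f2, if_neg Bool.false_ne_true]
              rw [hstep, h2, if_neg Bool.false_ne_true]
              rw [hstep, s1, if_neg Bool.false_ne_true]
              rw [hstep, h3, if_neg Bool.false_ne_true]
              rw [hstep, g1, if_neg Bool.false_ne_true]
              rw [hstep, s2, if_neg Bool.false_ne_true]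
              rw [hstep, s3, if_neg Bool.false_ne_true]
              rw [hstep, s4, if_neg Bool.false_ne_true]
              rw [hstep, h5, if_neg Bool.false_ne_true]
              rw [hstep, h4, if_neg Bool.false_ne_true]
              rw [hstep, s5, if_neg Bool.false_ne_true]
              rw [hstep, s6, if_neg Bool.false_ne_true]
              rw [hstep, s7, if_neg Bool.false_ne_true]
              rw [hstep, s8, if_neg Bool.false_ne_true]
              rw [hstep, s9, if_neg Bool.false_ne_true]
              rw [hstep, s10, if_neg Bool.false_ne_true]
              rw [hstep, s11, if_neg Bool.false_ne_true]
              rw [hstep, s12, if_neg Bool.false_ne_true]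
              rw [hstep, h6, if_pos rfl]
              rfl
            · simp only [Bool.not_eq_true] at h6
              by_cases h7 : PySem.Str.startswith l "web search" = true
              · rw [h1, h2, h3, h4, h5, h6, h7]
                rw [hstep, f1, if_neg Bool.false_ne_true]
                rw [hstep, h1, if_neg Bool.false_ne_true]
                rw [hstep, f2, if_neg Bool.false_ne_true]
                rw [hstep, h2, if_neg Bool.false_ne_true]
                rw [hstep, s1, if_neg Bool.false_ne_true]
                rw [hstep, h3, if_neg Bool.false_ne_true]
                rw [hstep, g1, if_neg Bool.false_ne_true]
                rw [hstep, s2, if_neg Bool.false_ne_true]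
                rw [hstep, s3, if_neg Bool.false_ne_true]
                rw [hstep, s4, if_neg Bool.false_ne_true]
                rw [hstep, h5, if_neg Bool.false_ne_true]
                rw [hstep, h4, if_neg Bool.false_ne_true]
                rw [hstep, s5, if_neg Bool.false_ne_true]
                rw [hstep, s6, if_neg Bool.false_ne_true]
                rw [hstep, s7, if_neg Bool.false_ne_true]
                rw [hstep, s8, if_neg Bool.false_ne_true]
                rw [hstep, s9, if_neg Bool.false_ne_true]
                rw [hstep, s10, if_neg Bool.false_ne_true]
                rw [hstep, s11, if_neg Bool.false_ne_true]
                rw [hstep, s12, if_neg Bool.false_ne_true]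
                rw [hstep, h6, if_neg Bool.false_ne_true]
                rw [hstep, h7, if_pos rfl]
                rfl
              · simp only [Bool.not_eq_true] at h7
                rw [h1, h2, h3, h4, h5, h6, h7]
                rw [hstep, f1, if_neg Bool.false_ne_true]
                rw [hstep, h1, if_neg Bool.false_ne_true]
                rw [hstep, f2, if_neg Bool.false_ne_true]
                rw [hstep, h2, if_neg Bool.false_ne_true]
                rw [hstep, s1, if_neg Bool.false_ne_true]
                rw [hstep, h3, if_neg Bool.false_ne_true]
                rw [hstep, g1, if_neg Bool.false_ne_true]
                rw [hstep, s2, if_neg Bool.false_ne_true]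
                rw [hstep, s3, if_neg Bool.false_ne_true]
                rw [hstep, s4, if_neg Bool.false_ne_true]
                rw [hstep, h5, if_neg Bool.false_ne_true]
                rw [hstep, h4, if_neg Bool.false_ne_true]
                rw [hstep, s5, if_neg Bool.false_ne_true]
                rw [hstep, s6, if_neg Bool.false_ne_true]
                rw [hstep, s7, if_neg Bool.false_ne_true]
                rw [hstep, s8, if_neg Bool.false_ne_true]
                rw [hstep, s9, if_neg Bool.false_ne_true]
                rw [hstep, s10, if_neg Bool.false_ne_true]
                rw [hstep, s11, if_neg Bool.false_ne_true]
                rw [hstep, s12, if_neg Bool.false_ne_true]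
                rw [hstep, h6, if_neg Bool.false_ne_true]
                rw [hstep, h7, if_neg Bool.false_ne_true]
                rw [hnil]
                rfl

-- ===== VERDICT (by name: the statement is the Claim_ definition above) =====
theorem normalize_search_query_py_spec : Claim_equal_normalize_search_query_py := by
  intro query _
  unfold Spec_normalize_search_query_py
  have hor : PySem.Str.strip (if query = "" then "" else query) = PySem.Str.strip query := by
    split_ifs with h
    · rw [h]
    · rfl
  show normalize_search_query_py query = normalize_search_query_py_alt query
  unfold normalize_search_query_py normalize_search_query_py_alt
  rw [hor]
  exact pv_sel _ _
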